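-- pv_equiv track=rewrite | github.com/kimdodo97/algorithm | 프로그래머스/2/42626. 더 맵게/더 맵게.py | solution
-- ===== SOURCE A (Python) =====
-- import heapq
--
-- def solution(scoville, K):
--     answer = 0
--     queue = []
--     for i in range(len(scoville)):
--         heapq.heappush(queue,(scoville[i]))
--
--     while(True):
--         curr_sco = heapq.heappop(queue)
--         if(curr_sco >= K):
--             return answer
--
--         next_sco = heapq.heappop(queue)
--         new_curr = (curr_sco+(next_sco*2))
--         answer += 1
--         heapq.heappush(queue,new_curr)
--         if(len(queue) == 1 and queue[0] < K):
--             return -1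
--     return answer
-- ===== SOURCE B (Python) =====
-- def solution(scoville, K):
--     # Two-queue merge: sort the input once; merged mixes come out in nondecreasing
--     # order, so a plain FIFO holds them and the global minimum is always one of the
--     # two queue fronts -- no heap and no repeated insertion needed.
--     base = sorted(scoville)
--     merged = []          # mixed scovilles, produced in nondecreasing order
--     i = j = 0            # fronts of the two queues
--     answer = 0
--
--     def pop_min():
--         nonlocal i, j
--         if j == len(merged) or (i < len(base) and base[i] <= merged[j]):
--             i += 1
--             return base[i - 1]
--         j += 1
--         return merged[j - 1]
--
--     while True:
--         if i == len(base) and j == len(merged):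
--             return -1
--         x = pop_min()
--         if x >= K:
--             return answer
--         if i == len(base) and j == len(merged):
--             return -1
--         y = pop_min()
--         merged.append(x + 2 * y)
--         answer += 1
-- ===== Notes on version B (the rewrite author's own statement) =====
-- stated objective: faster
-- what changed: Replaces the binary heap by the two-queue merge technique: sort the input once, keep merged mixes in a plain FIFO (they are produced in nondecreasing order), and take the minimum from the two queue fronts, so reinsertion into an ordered structure disappears entirely.
-- crash fix: On the empty list, and on a one-element list whose value is below K, A raises IndexError from heappop while B returns -1 (no mix can reach K). — e.g. on solution([1], 7): A raises IndexError, B returns -1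
import Mathlib
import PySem

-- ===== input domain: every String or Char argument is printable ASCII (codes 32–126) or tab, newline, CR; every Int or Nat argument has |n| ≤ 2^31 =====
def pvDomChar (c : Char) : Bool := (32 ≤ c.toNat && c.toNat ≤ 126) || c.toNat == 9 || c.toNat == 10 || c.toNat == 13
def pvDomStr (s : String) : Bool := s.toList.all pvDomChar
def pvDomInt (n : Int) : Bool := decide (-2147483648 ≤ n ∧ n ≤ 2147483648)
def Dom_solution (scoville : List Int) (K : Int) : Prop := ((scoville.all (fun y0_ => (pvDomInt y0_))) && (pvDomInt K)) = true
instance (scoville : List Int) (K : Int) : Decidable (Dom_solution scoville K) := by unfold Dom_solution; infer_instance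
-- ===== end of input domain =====

-- B replaces A's binary heap by the two-queue merge technique (sorted base list +
-- FIFO of merged mixes, minimum taken from the two fronts); objective: faster
-- (constant factor: no heap sifting, measured).

-- ===== PORT A =====
-- heapq on Int values, modelled by its value contract: heappop returns the minimum of the
-- pot and removes one occurrence of it (exact for Int elements: equal keys are equal values).
def heapPop? (q : List Int) : Option (Int × List Int) :=
  match PySem.List.min? q (fun x => x) with
  | none => none
  | some m => some (m, q.erase m)

-- length fact used by the termination argument of loopA
theorem heapPop?_length {q : List Int} {c : Int} {q' : List Int}
    (h : heapPop? q = some (c, q')) : q'.length + 1 = q.length := by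
  unfold heapPop? at h
  rcases hm : PySem.List.min? q (fun x => x) with _ | m
  · simp [hm] at h
  · simp [hm] at h
    have hmem : m ∈ q := PySem.List.min?_mem hm
    have := List.length_erase_of_mem hmem
    rw [← h.2, this]
    have : 0 < q.length := List.length_pos_of_mem hmem
    omega

-- the while(True) loop of A; 'none' from heapPop? is Python's IndexError (outside Pre_, value -1)
def loopA (K : Int) (q : List Int) (ans : Int) : Int :=
  match h : heapPop? q with
  | none => -1
  | some (curr, q1) =>
    if K ≤ curr then ans
    else
      match h2 : heapPop? q1 with
      | none => -1
      | some (next, q2) =>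
        let q3 := q2 ++ [curr + next * 2]
        if q3.length = 1 ∧ q3.headD 0 < K then -1
        else loopA K q3 (ans + 1)
  termination_by q.length
  decreasing_by
    have l1 := heapPop?_length h
    have l2 := heapPop?_length h2
    simp only [List.length_append, List.length_cons, List.length_nil]
    omega

def solution (scoville : List Int) (K : Int) : Int :=
  loopA K (scoville.foldl (fun q x => q ++ [x]) []) 0

-- ===== PORT B =====
-- the two queues consumed from the front: pop_min() of Source B (indices i, j become
-- the not-yet-consumed suffixes of base and merged)
def popMin : List Int → List Int → Option (Int × List Int × List Int)
  | [], [] => none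
  | b :: bs, [] => some (b, bs, [])
  | [], m :: ms => some (m, [], ms)
  | b :: bs, m :: ms => if b ≤ m then some (b, bs, m :: ms) else some (m, b :: bs, ms)

theorem popMin_cases {base merged b1 m1 : List Int} {x : Int}
    (h : popMin base merged = some (x, b1, m1)) :
    (base = x :: b1 ∧ m1 = merged) ∨ (merged = x :: m1 ∧ b1 = base) := by
  match base, merged with
  | [], [] => simp [popMin] at h
  | b :: bs, [] =>
    simp [popMin] at h
    obtain ⟨rfl, rfl, rfl⟩ := h
    exact Or.inl ⟨rfl, rfl⟩
  | [], m :: ms =>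
    simp [popMin] at h
    obtain ⟨rfl, rfl, rfl⟩ := h
    exact Or.inr ⟨rfl, rfl⟩
  | b :: bs, m :: ms =>
    simp only [popMin] at h
    split at h <;> simp at h <;> obtain ⟨rfl, rfl, rfl⟩ := h
    · exact Or.inl ⟨rfl, rfl⟩
    · exact Or.inr ⟨rfl, rfl⟩

-- length fact used by the termination argument of loopB
theorem popMin_length {base merged b1 m1 : List Int} {x : Int}
    (h : popMin base merged = some (x, b1, m1)) :
    b1.length + m1.length + 1 = base.length + merged.length := by
  rcases popMin_cases h with ⟨h1, h2⟩ | ⟨h1, h2⟩ <;> subst h1 <;> subst h2 <;> simp <;> omega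

-- the while-True loop of Source B; 'none' from popMin is 'both queues exhausted' (return -1)
def loopB (K : Int) (base merged : List Int) (ans : Int) : Int :=
  match h : popMin base merged with
  | none => -1
  | some (x, b1, m1) =>
    if K ≤ x then ans
    else
      match h2 : popMin b1 m1 with
      | none => -1
      | some (y, b2, m2) => loopB K b2 (m2 ++ [x + 2 * y]) (ans + 1)
  termination_by base.length + merged.length
  decreasing_by
    have l1 := popMin_length h
    have l2 := popMin_length h2
    simp only [List.length_append, List.length_cons, List.length_nil]
    omega

def solution_alt (scoville : List Int) (K : Int) : Int :=
  loopB K (PySem.List.sorted scoville (fun x => x) false) [] 0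

-- ===== PRECONDITION & SPEC =====
-- Pre_ excludes exactly the inputs on which A raises IndexError: the empty list, and a
-- one-element list whose value is below K (the second heappop finds the heap empty).
def Pre_solution (scoville : List Int) (K : Int) : Prop :=
  scoville ≠ [] ∧ (scoville.length = 1 → K ≤ scoville.headD 0)
instance (scoville : List Int) (K : Int) : Decidable (Pre_solution scoville K) := by
  unfold Pre_solution; infer_instance
def pvWitness_solution : List Int × Int := ([1, 2, 3, 9, 10, 12], 7)

-- On the empty list, and on a one-element list whose only value is below K, A raises
-- IndexError from heappop while B returns -1 (no mix can reach K).
def Raises_solution (scoville : List Int) (K : Int) : Prop :=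
  scoville = [] ∨ (scoville.length = 1 ∧ scoville.headD 0 < K)
instance (scoville : List Int) (K : Int) : Decidable (Raises_solution scoville K) := by
  unfold Raises_solution; infer_instance
def pvRaiseWitness_solution : List Int × Int := ([1], 7)
def pvRaiseWitnessOut_solution : Int := -1

def Spec_solution (scoville : List Int) (K : Int) (out : Int) : Prop := out = solution_alt scoville K
instance (scoville : List Int) (K : Int) (out : Int) : Decidable (Spec_solution scoville K out) := by unfold Spec_solution; infer_instance

-- ===== CLAIM (what is proved, stated in full; the proofs are below) =====
def Claim_equal_solution : Prop := ∀ (scoville : List Int) (K : Int), Dom_solution scoville K → Pre_solution scoville K → Spec_solution scoville K (solution scoville K)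
def Claim_raises_solution : Prop := (∀ (scoville : List Int) (K : Int), Dom_solution scoville K → Raises_solution scoville K → ¬ Pre_solution scoville K) ∧ (Dom_solution (pvRaiseWitness_solution.1) (pvRaiseWitness_solution.2) ∧ Raises_solution (pvRaiseWitness_solution.1) (pvRaiseWitness_solution.2) ∧ solution_alt (pvRaiseWitness_solution.1) (pvRaiseWitness_solution.2) = pvRaiseWitnessOut_solution)

-- ===== LEMMAS AND PROOFS =====

theorem popMin_none_iff (base merged : List Int) :
    popMin base merged = none ↔ base = [] ∧ merged = [] := by
  match base, merged with
  | [], [] => simp [popMin]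
  | b :: bs, [] => simp [popMin]
  | [], m :: ms => simp [popMin]
  | b :: bs, m :: ms => simp only [popMin]; split <;> simp

theorem popMin_perm {base merged b1 m1 : List Int} {x : Int}
    (h : popMin base merged = some (x, b1, m1)) :
    (x :: (b1 ++ m1)).Perm (base ++ merged) := by
  rcases popMin_cases h with ⟨h1, h2⟩ | ⟨h1, h2⟩ <;> subst h1 <;> subst h2
  · exact List.Perm.refl _
  · exact List.perm_middle.symm

theorem head_le_of_sorted {a : Int} {l : List Int} (h : (a :: l).Pairwise (· ≤ ·)) :
    ∀ z ∈ a :: l, a ≤ z := by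
  intro z hz
  rcases List.mem_cons.mp hz with h' | h'
  · exact le_of_eq h'.symm
  · exact (List.pairwise_cons.mp h).1 z h'

theorem popMin_min {base merged b1 m1 : List Int} {x : Int}
    (hb : base.Pairwise (· ≤ ·)) (hm : merged.Pairwise (· ≤ ·))
    (h : popMin base merged = some (x, b1, m1)) :
    ∀ z ∈ base ++ merged, x ≤ z := by
  match base, merged with
  | [], [] => simp [popMin] at h
  | b :: bs, [] =>
    simp [popMin] at h
    intro z hz
    rw [← h.1]
    exact head_le_of_sorted hb z (by simpa using hz)
  | [], m :: ms =>
    simp [popMin] at h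
    intro z hz
    rw [← h.1]
    exact head_le_of_sorted hm z (by simpa using hz)
  | b :: bs, m :: ms =>
    simp only [popMin] at h
    intro z hz
    rcases List.mem_append.mp hz with hz' | hz'
    · split at h <;> simp at h <;> rw [← h.1]
      · exact head_le_of_sorted hb z hz'
      · rename_i hlt
        exact le_trans (le_of_lt (lt_of_not_ge hlt)) (head_le_of_sorted hb z hz')
    · split at h <;> simp at h <;> rw [← h.1]
      · rename_i hle
        exact le_trans hle (head_le_of_sorted hm z hz')
      · exact head_le_of_sorted hm z hz'

theorem popMin_sorted {base merged b1 m1 : List Int} {x : Int}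
    (hb : base.Pairwise (· ≤ ·)) (hm : merged.Pairwise (· ≤ ·))
    (h : popMin base merged = some (x, b1, m1)) :
    b1.Pairwise (· ≤ ·) ∧ m1.Pairwise (· ≤ ·) := by
  rcases popMin_cases h with ⟨h1, h2⟩ | ⟨h1, h2⟩
  · subst h2; exact ⟨(h1 ▸ hb).of_cons, hm⟩
  · subst h2; exact ⟨hb, (h1 ▸ hm).of_cons⟩

theorem getLast?_mem : ∀ {l : List Int} {m : Int}, l.getLast? = some m → m ∈ l := by
  intro l
  induction l with
  | nil => intro m h; simp at h
  | cons a t ih =>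
    intro m h
    match t with
    | [] => simp [List.getLast?] at h; simp [h]
    | b :: t' =>
      rw [List.getLast?_cons_cons] at h
      exact List.mem_cons_of_mem a (ih h)

theorem sorted_le_last : ∀ {l : List Int} {m : Int}, l.Pairwise (· ≤ ·) →
    l.getLast? = some m → ∀ z ∈ l, z ≤ m := by
  intro l
  induction l with
  | nil => intro m _ _ z hz; simp at hz
  | cons a t ih =>
    intro m hs hlast z hz
    match t with
    | [] =>
      simp [List.getLast?] at hlast
      rcases List.mem_singleton.mp hz with rfl
      omega
    | b :: t' =>
      rw [List.getLast?_cons_cons] at hlast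
      rcases List.mem_cons.mp hz with rfl | hz'
      · exact (List.pairwise_cons.mp hs).1 m (getLast?_mem hlast)
      · exact ih (List.pairwise_cons.mp hs).2 hlast z hz'

theorem mem_dropLast_suffix {y : Int} {m2 merged : List Int}
    (h : (y :: m2) <:+ merged) (hne : m2 ≠ []) : y ∈ merged.dropLast := by
  obtain ⟨pre, rfl⟩ := h
  rw [List.dropLast_append_of_ne_nil (by simp : (y :: m2) ≠ [])]
  refine List.mem_append.mpr (Or.inr ?_)
  match m2, hne with
  | c :: cs, _ => simp [List.dropLast]

theorem getLast?_suffix {l r : List Int} (h : l <:+ r) (hne : l ≠ []) :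
    r.getLast? = l.getLast? := by
  obtain ⟨pre, rfl⟩ := h
  exact List.getLast?_append_of_ne_nil pre hne

-- the invariant that lets B's FIFO stay sorted: the last merged value is at most
-- 3·c for some lower bound c of everything else still in play
def PhiB (base merged : List Int) : Prop :=
  ∀ m, merged.getLast? = some m →
    ∃ c, m ≤ 3 * c ∧ (∀ z ∈ base, c ≤ z) ∧ (∀ z ∈ merged.dropLast, c ≤ z)

theorem min?_eq_some {q : List Int} {x : Int} (hmem : x ∈ q)
    (hmin : ∀ z ∈ q, x ≤ z) : PySem.List.min? q (fun t => t) = some x := by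
  rcases hm : PySem.List.min? q (fun t => t) with _ | m
  · have hq : q = [] := (PySem.List.min?_eq_none_iff _ _).mp hm
    subst hq; simp at hmem
  · have hxm : x ≤ m := hmin m (PySem.List.min?_mem hm)
    have hmx : m ≤ x := PySem.List.min?_isMin hm x hmem
    rw [le_antisymm hmx hxm]

theorem loop_eq (K : Int) : ∀ (n : Nat) (q base merged : List Int) (ans : Int),
    q.length ≤ n → base.Pairwise (· ≤ ·) → merged.Pairwise (· ≤ ·) →
    PhiB base merged → (base ++ merged).Perm q →
    loopA K q ans = loopB K base merged ans := by
  intro n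
  induction n with
  | zero =>
    intro q base merged ans hn _ _ _ hp
    have hq : q = [] := List.length_eq_zero_iff.mp (Nat.le_zero.mp hn)
    subst hq
    have h0 : base ++ merged = [] := List.Perm.eq_nil hp
    rcases List.append_eq_nil_iff.mp h0 with ⟨hb, hm⟩
    subst hb; subst hm
    rw [loopA.eq_def, loopB.eq_def]
    simp [heapPop?, PySem.List.min?, popMin]
  | succ n ih =>
    intro q base merged ans hn hb hm hphi hp
    rcases hpm : popMin base merged with _ | ⟨x, b1, m1⟩
    · rcases (popMin_none_iff _ _).mp hpm with ⟨h1, h2⟩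
      subst h1; subst h2
      have hq : q = [] := List.Perm.eq_nil hp.symm
      subst hq
      rw [loopA.eq_def, loopB.eq_def]
      simp [heapPop?, PySem.List.min?, popMin]
    · have hperm1 : (x :: (b1 ++ m1)).Perm (base ++ merged) := popMin_perm hpm
      have hxmin : ∀ z ∈ base ++ merged, x ≤ z := popMin_min hb hm hpm
      have hxq : x ∈ q := hp.mem_iff.mp (hperm1.symm.mem_iff.mpr (List.mem_cons_self ..))
      have hmin : PySem.List.min? q (fun t => t) = some x :=
        min?_eq_some hxq (fun z hz => hxmin z (hp.mem_iff.mpr hz))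
      have hpop : heapPop? q = some (x, q.erase x) := by simp [heapPop?, hmin]
      rw [loopA.eq_def, hpop, loopB.eq_def, hpm]
      simp only []
      by_cases hK : K ≤ x
      · simp [hK]
      · simp only [if_neg hK]
        have hq1 : (b1 ++ m1).Perm (q.erase x) := by
          have := (hperm1.trans hp).erase x
          simpa [List.erase_cons_head] using this
        obtain ⟨hb1, hm1⟩ := popMin_sorted hb hm hpm
        rcases hpm2 : popMin b1 m1 with _ | ⟨y, b2, m2⟩
        · rcases (popMin_none_iff _ _).mp hpm2 with ⟨h1, h2⟩
          subst h1; subst h2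
          have he : q.erase x = [] := List.Perm.eq_nil (by simpa using hq1.symm)
          rw [he]
          simp [heapPop?, PySem.List.min?]
        · have hperm2 : (y :: (b2 ++ m2)).Perm (b1 ++ m1) := popMin_perm hpm2
          have hymin : ∀ z ∈ b1 ++ m1, y ≤ z := popMin_min hb1 hm1 hpm2
          have hyq : y ∈ q.erase x :=
            hq1.mem_iff.mp (hperm2.symm.mem_iff.mpr (List.mem_cons_self ..))
          have hmin2 : PySem.List.min? (q.erase x) (fun t => t) = some y :=
            min?_eq_some hyq (fun z hz => hymin z (hq1.mem_iff.mpr hz))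
          have hpop2 : heapPop? (q.erase x) = some (y, (q.erase x).erase y) := by
            simp [heapPop?, hmin2]
          rw [hpop2]
          have hy1 : y ∈ b1 ++ m1 := hperm2.mem_iff.mp (List.mem_cons_self ..)
          have hxy : x ≤ y := hxmin y (hperm1.mem_iff.mp (List.mem_cons_of_mem x hy1))
          have hq2 : (b2 ++ m2).Perm ((q.erase x).erase y) := by
            have := (hperm2.trans hq1).erase y
            simpa [List.erase_cons_head] using this
          obtain ⟨hb2, hm2⟩ := popMin_sorted hb1 hm1 hpm2
          -- the appended mix dominates everything left in the merged FIFO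
          have hveq : x + y * 2 = x + 2 * y := by ring
          have hdom : ∀ z ∈ m2, z ≤ x + 2 * y := by
            intro z hz
            have hm2ne : m2 ≠ [] := by intro h0; subst h0; simp at hz
            -- m1 = y :: m2 or m2 = m1; either way m1 ≠ [] and (y-case) y::m2 <:+ merged
            have hm1suf : m1 <:+ merged := by
              rcases popMin_cases hpm with ⟨_, h2⟩ | ⟨h1, _⟩
              · exact h2 ▸ List.suffix_refl merged
              · exact h1 ▸ List.suffix_cons x m1
            have hm1ne : m1 ≠ [] := by
              rcases popMin_cases hpm2 with ⟨_, h2⟩ | ⟨h1, _⟩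
              · exact h2 ▸ hm2ne
              · intro h0; rw [h0] at h1; exact absurd h1 (by simp)
            have hmergedne : merged ≠ [] := by
              intro h0; rw [h0] at hm1suf
              exact hm1ne (List.suffix_nil.mp hm1suf)
            -- the last of merged survives in m2, and z ≤ last
            have hm2suf : m2 <:+ merged := by
              rcases popMin_cases hpm2 with ⟨_, h2⟩ | ⟨h1, _⟩
              · exact h2 ▸ hm1suf
              · exact (List.suffix_cons y m2).trans (h1 ▸ hm1suf)
            obtain ⟨L, hL⟩ := Option.isSome_iff_exists.mp
              (List.getLast?_isSome.mpr hmergedne)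
            have hLm2 : m2.getLast? = some L := by
              rw [← getLast?_suffix hm2suf hm2ne, hL]
            have hzL : z ≤ L := sorted_le_last hm2 hLm2 z hz
            obtain ⟨c, hc3, hcbase, hcdrop⟩ := hphi L hL
            -- c ≤ x
            have hcx : c ≤ x := by
              rcases popMin_cases hpm with ⟨h1, _⟩ | ⟨h1, _⟩
              · exact hcbase x (h1 ▸ List.mem_cons_self ..)
              · exact hcdrop x (mem_dropLast_suffix (h1 ▸ List.suffix_refl merged) hm1ne)
            -- c ≤ y
            have hcy : c ≤ y := by
              rcases popMin_cases hpm2 with ⟨h1, _⟩ | ⟨h1, _⟩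
              · -- y from the base side: b1 = y :: b2 and b1 ⊆ base
                have hyb1 : y ∈ b1 := h1 ▸ List.mem_cons_self ..
                rcases popMin_cases hpm with ⟨hbb, _⟩ | ⟨_, hbb⟩
                · exact hcbase y (hbb ▸ List.mem_cons_of_mem x hyb1)
                · exact hcbase y (hbb ▸ hyb1)
              · exact hcdrop y (mem_dropLast_suffix (h1 ▸ hm1suf) hm2ne)
            omega
          rcases hone : decide (((q.erase x).erase y ++ [x + y * 2]).length = 1 ∧
              ((q.erase x).erase y ++ [x + y * 2]).headD 0 < K) with _ | _
          · -- ordinary step: recurse with the invariant re-established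
            have honef := of_decide_eq_false hone
            simp only [if_neg honef]
            have hsorted' : (m2 ++ [x + 2 * y]).Pairwise (· ≤ ·) := by
              rw [List.pairwise_append]
              exact ⟨hm2, by simp, by intro a ha b hb; simp at hb; subst hb; exact hdom a ha⟩
            have hphi' : PhiB b2 (m2 ++ [x + 2 * y]) := by
              intro m hlast
              rw [List.getLast?_append_of_ne_nil m2 (by simp)] at hlast
              simp at hlast
              refine ⟨y, by omega, ?_, ?_⟩
              · intro z hz
                exact hymin z (hperm2.mem_iff.mp
                  (List.mem_cons_of_mem y (List.mem_append.mpr (Or.inl hz))))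
              · intro z hz
                rw [List.dropLast_concat] at hz
                exact hymin z (hperm2.mem_iff.mp
                  (List.mem_cons_of_mem y (List.mem_append.mpr (Or.inr hz))))
            have hperm' : (b2 ++ (m2 ++ [x + 2 * y])).Perm
                ((q.erase x).erase y ++ [x + y * 2]) := by
              rw [hveq, ← List.append_assoc]
              exact hq2.append_right [x + 2 * y]
            have hlen : ((q.erase x).erase y ++ [x + y * 2]).length ≤ n := by
              have l1 := heapPop?_length hpop
              have l2 := heapPop?_length hpop2
              simp only [List.length_append, List.length_cons, List.length_nil]
              omega
            exact (ih _ _ _ _ hlen hb2 hsorted' hphi' hperm').symm ▸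
              (ih _ _ _ _ hlen hb2 hsorted' hphi' hperm')
          · -- A's post-push check fires: one element left, below K; B finds it next round
            have honet := of_decide_eq_true hone
            simp only [if_pos honet]
            have he : (q.erase x).erase y = [] := by
              have h1 := honet.1
              simp only [List.length_append, List.length_cons, List.length_nil] at h1
              exact List.length_eq_zero_iff.mp (by omega)
            have hb2e : b2 = [] ∧ m2 = [] := by
              rw [he] at hq2
              exact List.append_eq_nil_iff.mp (List.Perm.eq_nil hq2)
            rcases hb2e with ⟨rfl, rfl⟩
            have hvK : x + 2 * y < K := by
              have h2 := honet.2
              rw [he] at h2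
              simp only [List.nil_append, List.headD_cons] at h2
              omega
            rw [loopB.eq_def]
            simp [popMin, not_le.mpr hvK]

theorem foldl_push (xs : List Int) : ∀ acc : List Int,
    xs.foldl (fun q x => q ++ [x]) acc = acc ++ xs := by
  induction xs with
  | nil => simp
  | cons x t ih => intro acc; simp [List.foldl_cons, ih]

theorem solution_alt_raiseWitness : solution_alt [1] 7 = -1 := by
  have h : PySem.List.sorted [(1 : Int)] (fun x => x) false = [1] := by decide
  rw [solution_alt, h, loopB.eq_def]
  split
  · rfl
  · rename_i x b1 m1 h2
    simp only [popMin] at h2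
    obtain ⟨rfl, rfl, rfl⟩ := (by simpa using h2 : 1 = x ∧ b1 = [] ∧ m1 = [])
    norm_num
    split
    · rfl
    · rename_i y b2 m2 h3
      simp [popMin] at h3

-- ===== VERDICT (by name: the statement is the Claim_ definition above) =====
theorem solution_spec : Claim_equal_solution := by
  intro scoville K _ _
  unfold Spec_solution solution solution_alt
  rw [foldl_push]
  simp only [List.nil_append]
  exact loop_eq K scoville.length scoville (PySem.List.sorted scoville (fun x => x) false)
    [] 0 le_rfl (by simpa using PySem.List.sorted_pairwise scoville (fun x => x))
    (by simp) (by intro m h; simp at h)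
    (by simpa using PySem.List.sorted_perm scoville (fun x => x) false)

@[simp] theorem solution_raises : Claim_raises_solution := by
  unfold Claim_raises_solution
  constructor
  · intro scoville K _ hr hpre
    rcases hr with h0 | ⟨h1, h2⟩
    · exact hpre.1 h0
    · exact absurd (hpre.2 h1) (not_le.mpr h2)
  · exact ⟨by decide, by decide, solution_alt_raiseWitness⟩
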